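-- pv_equiv track=rewrite | github.com/aidangarske/wolfCOSE | scripts/check-empty-brace-scopes.py | previous_code_line
-- ===== SOURCE A (Python) =====
-- def strip_line_comment(line: str) -> str:
--     """Remove simple // comments without trying to parse C strings."""
--     return line.split("//", 1)[0].strip()
--
-- def is_comment_only(line: str) -> bool:
--     stripped = line.strip()
--     return (
--         stripped.startswith("/*")
--         or stripped.startswith("*")
--         or stripped == "*/"
--     )
--
-- def previous_code_line(lines: list[str], index: int) -> tuple[int, str] | None:
--     """Return the previous non-empty, non-preprocessor code line."""
--     for prev_index in range(index - 1, -1, -1):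
--         if is_comment_only(lines[prev_index]):
--             continue
--         stripped = strip_line_comment(lines[prev_index])
--         if not stripped:
--             continue
--         if stripped.startswith("#"):
--             continue
--         return prev_index + 1, stripped
--     return None
-- ===== SOURCE B (Python) =====
-- def strip_line_comment(line: str) -> str:
--     """Remove simple // comments without trying to parse C strings."""
--     return line.split("//", 1)[0].strip()
--
-- def is_comment_only(line: str) -> bool:
--     stripped = line.strip()
--     return (
--         stripped.startswith("/*")
--         or stripped.startswith("*")
--         or stripped == "*/"
--     )
--
-- def _code_of(pair):
--     """Map an (i, line) pair to its (1-based index, stripped code) or None."""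
--     i, line = pair
--     if is_comment_only(line):
--         return None
--     stripped = strip_line_comment(line)
--     if not stripped or stripped.startswith("#"):
--         return None
--     return (i + 1, stripped)
--
-- def previous_code_line(lines, index):
--     """Collect every qualifying line in the prefix, return the last one."""
--     prefix = lines[:max(index, 0)]
--     matches = [m for m in map(_code_of, enumerate(prefix)) if m is not None]
--     return matches[-1] if matches else None
-- ===== Notes on version B (the rewrite author's own statement) =====
-- stated objective: alternative
-- what changed: Replaced A's backward index scan with early return by slicing the prefix lines[:max(index,0)], mapping each enumerated line to its qualifying (1-based index, stripped) pair or None, filtering, and returning the last collected match.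
import Mathlib
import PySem

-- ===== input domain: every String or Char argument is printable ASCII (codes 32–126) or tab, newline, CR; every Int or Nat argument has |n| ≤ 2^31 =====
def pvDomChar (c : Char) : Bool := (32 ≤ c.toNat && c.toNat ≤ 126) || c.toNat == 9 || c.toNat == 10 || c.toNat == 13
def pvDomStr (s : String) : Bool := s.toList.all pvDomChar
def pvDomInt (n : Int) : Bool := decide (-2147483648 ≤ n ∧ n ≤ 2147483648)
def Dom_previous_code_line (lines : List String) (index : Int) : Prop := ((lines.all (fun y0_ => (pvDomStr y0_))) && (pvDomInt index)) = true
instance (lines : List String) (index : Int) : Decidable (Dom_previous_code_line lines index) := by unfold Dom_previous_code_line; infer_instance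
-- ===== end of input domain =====

-- B replaces A's backward scan with early return by a prefix-slice + filter of all qualifying lines, returning the last; same cost, different decomposition.

-- ===== PORT A =====
-- helpers shared by both Python versions (same module): line.split("//", 1)[0].strip()
def stripLineComment (line : String) : String :=
  match (PySem.Str.splitMax? line "//" 1).bind (fun parts => PySem.List.pyGet? parts 0) with
  | some h => PySem.Str.strip h
  | none => ""   -- unreachable: sep "//" ≠ "" and split is never empty

def isCommentOnly (line : String) : Bool :=
  let stripped := PySem.Str.strip line
  PySem.Str.startswith stripped "/*" || PySem.Str.startswith stripped "*" || (stripped == "*/")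

-- A's for-loop over range(index-1, -1, -1); none at an out-of-range index = IndexError (excluded by Pre_)
def prevLoopA (lines : List String) : List Int → Option (Int × String)
  | [] => none
  | i :: rest =>
    match PySem.List.pyGet? lines i with
    | none => none
    | some line =>
      if isCommentOnly line then prevLoopA lines rest
      else
        let stripped := stripLineComment line
        if stripped == "" then prevLoopA lines rest
        else if PySem.Str.startswith stripped "#" then prevLoopA lines rest
        else some (i + 1, stripped)

def previous_code_line (lines : List String) (index : Int) : Option (Int × String) :=
  prevLoopA lines (PySem.List.pyRange (index - 1) (-1) (-1))

-- ===== PORT B =====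
-- B's _code_of: an enumerated pair to its (1-based index, stripped code), or none
def codeOf (p : Int × String) : Option (Int × String) :=
  if isCommentOnly p.2 then none
  else
    let stripped := stripLineComment p.2
    if stripped == "" || PySem.Str.startswith stripped "#" then none
    else some (p.1 + 1, stripped)

def previous_code_line_alt (lines : List String) (index : Int) : Option (Int × String) :=
  let pre := PySem.List.slice lines none (some (max index 0))
  ((PySem.List.enumerate pre).filterMap codeOf).getLast?

-- ===== PRECONDITION & SPEC =====
-- A raises IndexError exactly when index > len(lines) (its loop indexes lines[index-1]).
def Pre_previous_code_line (lines : List String) (index : Int) : Prop := index ≤ (lines.length : Int)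
instance (lines : List String) (index : Int) : Decidable (Pre_previous_code_line lines index) := by unfold Pre_previous_code_line; infer_instance
def pvWitness_previous_code_line : List String × Int := (["int x; // hi", "/* c", "y=2;"], 3)

def Spec_previous_code_line (lines : List String) (index : Int) (out : Option (Int × String)) : Prop := out = previous_code_line_alt lines index
instance (lines : List String) (index : Int) (out : Option (Int × String)) : Decidable (Spec_previous_code_line lines index out) := by unfold Spec_previous_code_line; infer_instance

-- ===== CLAIM (what is proved, stated in full; the proofs are below) =====
def Claim_equal_previous_code_line : Prop := ∀ (lines : List String) (index : Int), Dom_previous_code_line lines index → Pre_previous_code_line lines index → Spec_previous_code_line lines index (previous_code_line lines index)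

-- ===== LEMMAS AND PROOFS =====

-- one step of A's loop, phrased through B's codeOf (same tests, same value)
theorem prevLoopA_cons (lines : List String) (i : Int) (rest : List Int) (line : String)
    (h : PySem.List.pyGet? lines i = some line) :
    prevLoopA lines (i :: rest) =
      match codeOf (i, line) with
      | some v => some v
      | none => prevLoopA lines rest := by
  simp only [prevLoopA, h, codeOf]
  split_ifs <;> simp_all

-- backward first-match over reversed indices = last element of B's filtered enumeration of the prefix
theorem loop_eq (lines : List String) (n : Nat) (hn : n ≤ lines.length) :
    prevLoopA lines (PySem.List.pyRange 0 (n : Int) 1).reverse =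
      ((PySem.List.enumerate (lines.take n)).filterMap codeOf).getLast? := by
  induction n with
  | zero => simp [prevLoopA, PySem.List.enumerate_nil]
  | succ m ih =>
    have hm : m < lines.length := hn
    have hrange : PySem.List.pyRange 0 ((m + 1 : Nat) : Int) 1
        = PySem.List.pyRange 0 (m : Int) 1 ++ [(m : Int)] := by
      have := PySem.List.pyRange_one_succ_right (a := 0) (b := (m : Int)) (by omega)
      simpa [add_comm] using this
    have htake : lines.take (m + 1) = lines.take m ++ [lines[m]] := by
      rw [List.take_add_one, List.getElem?_eq_getElem hm]; rfl
    have hget : PySem.List.pyGet? lines (m : Int) = some lines[m] := by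
      simp [PySem.List.pyGet?_natCast, List.getElem?_eq_getElem hm]
    have hlen : (lines.take m).length = m := by
      simp [List.length_take, Nat.min_eq_left hm.le]
    rw [hrange, htake, List.reverse_append, List.reverse_singleton, List.singleton_append,
        prevLoopA_cons lines (m : Int) _ _ hget,
        PySem.List.enumerate_append, List.filterMap_append, hlen, zero_add,
        PySem.List.enumerate_cons, PySem.List.enumerate_nil, ih hm.le]
    cases hc : codeOf ((m : Int), lines[m]) with
    | none => simp only [hc, List.filterMap_cons, List.filterMap_nil, List.append_nil]
    | some v => simp only [hc, List.filterMap_cons, List.filterMap_nil, List.getLast?_concat]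

-- ===== VERDICT (by name: the statement is the Claim_ definition above) =====
theorem previous_code_line_spec : Claim_equal_previous_code_line := by
  intro lines index _ hpre
  unfold Pre_previous_code_line at hpre
  unfold Spec_previous_code_line previous_code_line previous_code_line_alt
  by_cases h0 : 0 ≤ index
  · obtain ⟨n, rfl⟩ : ∃ n : Nat, index = (n : Int) := ⟨index.toNat, by omega⟩
    have hmax : max ((n : Int)) 0 = (n : Int) := by omega
    have hr : PySem.List.pyRange ((n : Int) - 1) (-1) (-1) = (PySem.List.pyRange 0 (n : Int) 1).reverse := by
      rw [PySem.List.pyRange_neg_one_eq_reverse]; norm_num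
    rw [hmax, hr, PySem.List.slice_to_natCast, loop_eq lines n (by exact_mod_cast hpre)]
  · have hmax : max index 0 = ((0 : Nat) : Int) := by omega
    have hr : PySem.List.pyRange (index - 1) (-1) (-1) = [] := by
      rw [PySem.List.pyRange_neg_one_eq_reverse, PySem.List.pyRange_one_eq_nil (by omega)]
      rfl
    rw [hmax, hr, PySem.List.slice_to_natCast]
    simp [prevLoopA, PySem.List.enumerate_nil]
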